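-- pv_equiv track=rewrite | github.com/cert-ee/cuckoo3 | processing/cuckoo/processing/event/translate/threemon/reader.py | remove_user_id
-- ===== SOURCE A (Python) =====
-- def remove_user_id(k):
--     k = k.lower()
--     if not k.startswith("\\registry\\user\\s-"):
--         return k
--
--     offset = 15
--     while offset < len(k):
--         if k[offset] == "\\":
--             break
--         offset += 1
--
--     return f"{k[:14]}{k[offset:]}"
-- ===== SOURCE B (Python) =====
-- def remove_user_id(k):
--     k = k.lower()
--     if not k.startswith("\\registry\\user\\s-"):
--         return k
--     parts = k.split("\\")
--     del parts[3]
--     return "\\".join(parts)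
-- ===== Notes on version B (the rewrite author's own statement) =====
-- stated objective: idiomatic
-- what changed: Replaces the manual character-scanning while loop and slice concatenation with tokenizing the path on backslashes, deleting the SID component (index 3) and rejoining.
import Mathlib
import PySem

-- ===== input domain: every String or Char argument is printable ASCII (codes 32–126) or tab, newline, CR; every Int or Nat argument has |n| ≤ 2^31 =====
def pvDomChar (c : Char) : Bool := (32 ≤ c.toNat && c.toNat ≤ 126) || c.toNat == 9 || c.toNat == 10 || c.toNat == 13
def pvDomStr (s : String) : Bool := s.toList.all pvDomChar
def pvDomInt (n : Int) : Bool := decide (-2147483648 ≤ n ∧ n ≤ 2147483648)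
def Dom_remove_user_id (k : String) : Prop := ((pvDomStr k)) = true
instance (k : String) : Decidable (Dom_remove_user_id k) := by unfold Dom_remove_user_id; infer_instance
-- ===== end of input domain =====

-- B replaces A's manual forward character scan (and slice concatenation) by splitting the
-- path on backslashes, deleting the SID component, and rejoining (objective: idiomatic).

-- ===== PORT A =====
-- the 'while offset < len(k): if k[offset] == "\\": break; offset += 1' loop of A
def remove_user_id_scan (cs : List Char) (offset : Nat) : Nat :=
  if h : offset < cs.length then
    if cs[offset] = '\\' then offset
    else remove_user_id_scan cs (offset + 1)
  else offset
termination_by cs.length - offset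

def remove_user_id (k : String) : String :=
  let k := PySem.Str.lower k
  if PySem.Str.startswith k "\\registry\\user\\s-" = false then k
  else
    let offset := remove_user_id_scan k.toList 15
    -- f"{k[:14]}{k[offset:]}"
    String.ofList (PySem.Chars.slice k.toList none (some 14) ++
                   PySem.Chars.slice k.toList (some (offset : Int)) none)

-- ===== PORT B =====
def remove_user_id_alt (k : String) : String :=
  let k := PySem.Str.lower k
  if PySem.Str.startswith k "\\registry\\user\\s-" = false then k
  else
    -- parts = k.split("\\"); del parts[3]; return "\\".join(parts)
    let parts := PySem.Chars.splitOn k.toList ['\\']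
    String.ofList (PySem.Chars.join ['\\'] (parts.eraseIdx 3))

-- ===== PRECONDITION & SPEC =====
def Spec_remove_user_id (k : String) (out : String) : Prop := out = remove_user_id_alt k
instance (k : String) (out : String) : Decidable (Spec_remove_user_id k out) := by unfold Spec_remove_user_id; infer_instance

-- ===== CLAIM (what is proved, stated in full; the proofs are below) =====
def Claim_equal_remove_user_id : Prop := ∀ (k : String), Dom_remove_user_id k → Spec_remove_user_id k (remove_user_id k)

-- ===== LEMMAS AND PROOFS =====

-- equations of PySem.Chars.splitOn.go at separator ['\\']
theorem go_nil (f : Nat) (cur : List Char) (acc : List (List Char)) :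
    PySem.Chars.splitOn.go ['\\'] f [] cur acc = (cur.reverse :: acc).reverse := by
  cases f <;> simp [PySem.Chars.splitOn.go]

theorem go_bs (f : Nat) (rest cur : List Char) (acc : List (List Char)) :
    PySem.Chars.splitOn.go ['\\'] (f + 1) ('\\' :: rest) cur acc =
      PySem.Chars.splitOn.go ['\\'] f rest [] (cur.reverse :: acc) := by
  simp [PySem.Chars.splitOn.go]

theorem go_ne (f : Nat) (c : Char) (rest cur : List Char) (acc : List (List Char))
    (h : c ≠ '\\') :
    PySem.Chars.splitOn.go ['\\'] (f + 1) (c :: rest) cur acc =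
      PySem.Chars.splitOn.go ['\\'] f rest (c :: cur) acc := by
  simp [PySem.Chars.splitOn.go, List.isPrefixOf]
  exact fun hc => absurd hc.symm h

-- a run of non-backslash characters is moved onto cur wholesale
theorem go_run (w : List Char) (hw : ∀ c ∈ w, c ≠ '\\') :
    ∀ (f : Nat) (rest cur : List Char) (acc : List (List Char)),
      PySem.Chars.splitOn.go ['\\'] (w.length + f) (w ++ rest) cur acc =
        PySem.Chars.splitOn.go ['\\'] f rest (w.reverse ++ cur) acc := by
  induction w with
  | nil => intro f rest cur acc; simp
  | cons c w ih =>
      intro f rest cur acc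
      have hc : c ≠ '\\' := hw c (by simp)
      have : (c :: w).length + f = (w.length + f) + 1 := by simp; omega
      rw [this]
      rw [show ((c :: w) ++ rest) = c :: (w ++ rest) by simp]
      rw [go_ne _ _ _ _ _ hc, ih (fun d hd => hw d (by simp [hd])) f rest (c :: cur) acc]
      simp

-- the accumulator is only ever prepended (reversed) to the final result
theorem go_acc (f : Nat) : ∀ (l cur : List Char) (acc : List (List Char)),
    PySem.Chars.splitOn.go ['\\'] f l cur acc =
      acc.reverse ++ PySem.Chars.splitOn.go ['\\'] f l cur [] := by
  induction f with
  | zero => intro l cur acc; simp [PySem.Chars.splitOn.go]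
  | succ f ih =>
      intro l cur acc
      cases l with
      | nil => simp [go_nil]
      | cons c rest =>
          by_cases hc : c = '\\'
          · subst hc
            rw [go_bs, go_bs, ih rest [] (cur.reverse :: acc), ih rest [] [cur.reverse]]
            simp
          · rw [go_ne _ _ _ _ _ hc, go_ne _ _ _ _ _ hc, ih rest (c :: cur) acc]

theorem go_ne_nil (f : Nat) : ∀ (l cur : List Char) (acc : List (List Char)),
    PySem.Chars.splitOn.go ['\\'] f l cur acc ≠ [] := by
  induction f with
  | zero => intro l cur acc; simp [PySem.Chars.splitOn.go]
  | succ f ih =>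
      intro l cur acc
      cases l with
      | nil => simp [go_nil]
      | cons c rest =>
          by_cases hc : c = '\\'
          · subst hc; rw [go_bs]; exact ih _ _ _
          · rw [go_ne _ _ _ _ _ hc]; exact ih _ _ _

-- joining the split back with the separator restores the input (single-char separator)
theorem go_join (f : Nat) : ∀ (l cur : List Char), l.length ≤ f →
    PySem.Chars.join ['\\'] (PySem.Chars.splitOn.go ['\\'] f l cur []) = cur.reverse ++ l := by
  induction f with
  | zero =>
      intro l cur h
      have : l = [] := by cases l <;> simp_all
      subst this
      simp [go_nil, PySem.Chars.join, List.intercalate]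
  | succ f ih =>
      intro l cur h
      cases l with
      | nil => simp [go_nil, PySem.Chars.join, List.intercalate]
      | cons c rest =>
          by_cases hc : c = '\\'
          · subst hc
            rw [go_bs, go_acc]
            obtain ⟨g0, G', hG⟩ : ∃ g0 G', PySem.Chars.splitOn.go ['\\'] f rest [] [] = g0 :: G' := by
              cases hE : PySem.Chars.splitOn.go ['\\'] f rest [] [] with
              | nil => exact absurd hE (go_ne_nil f rest [] [])
              | cons a b => exact ⟨a, b, rfl⟩
            have hrest := ih rest [] (by simpa using Nat.le_of_succ_le_succ h)
            rw [hG] at hrest ⊢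
            simp only [List.reverse_cons, List.reverse_nil, List.nil_append,
              List.singleton_append]
            rw [PySem.Chars.join_cons_cons]
            simp at hrest
            simp [hrest]
          · rw [go_ne _ _ _ _ _ hc]
            have := ih rest (c :: cur) (by simpa using Nat.le_of_succ_le_succ h)
            rw [this]; simp

-- A's scanning loop finds offset + length of the non-backslash run starting at offset
theorem scan_eq (cs : List Char) (off : Nat) :
    remove_user_id_scan cs off = off + ((cs.drop off).takeWhile (fun c => c != '\\')).length := by
  by_cases h : off < cs.length
  · rw [remove_user_id_scan]
    have hdrop : cs.drop off = cs[off] :: cs.drop (off + 1) := List.drop_eq_getElem_cons h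
    by_cases hc : cs[off] = '\\'
    · simp [h, hc, hdrop]
    · simp only [h, dif_pos, hc, if_neg, not_false_iff]
      rw [scan_eq cs (off + 1), hdrop, List.takeWhile_cons_of_pos (by simp [hc])]
      simp
      omega
  · rw [remove_user_id_scan]
    simp [h, List.drop_eq_nil_of_le (Nat.le_of_not_lt h)]
termination_by cs.length - off
decreasing_by omega

-- the central list-level fact: splitting, deleting index 3 and rejoining equals
-- "\registry\user" ++ (suffix of the SID token's first backslash)
theorem key_lemma (rest : List Char) :
    PySem.Chars.join ['\\']
        ((PySem.Chars.splitOn ("\\registry\\user\\s-".toList ++ rest) ['\\']).eraseIdx 3) =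
      "\\registry\\user".toList ++ rest.dropWhile (fun c => c != '\\') := by
  have hrtd := (List.takeWhile_append_dropWhile (p := fun c => c != '\\') (l := rest)).symm
  set t := rest.takeWhile (fun c => c != '\\') with ht
  set d := rest.dropWhile (fun c => c != '\\') with hd
  have htne : ∀ c ∈ 's' :: '-' :: t, c ≠ '\\' := by
    intro c hc
    simp only [List.mem_cons] at hc
    rcases hc with rfl | rfl | hc
    · decide
    · decide
    · have := List.mem_takeWhile_imp (by exact hc)
      simpa using this
  have hregne : ∀ c ∈ "registry".toList, c ≠ '\\' := by
    intro c hc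
    rw [show "registry".toList = ['r','e','g','i','s','t','r','y'] from rfl] at hc
    fin_cases hc <;> decide
  have husrne : ∀ c ∈ "user".toList, c ≠ '\\' := by
    intro c hc
    rw [show "user".toList = ['u','s','e','r'] from rfl] at hc
    fin_cases hc <;> decide
  have hsplit : PySem.Chars.splitOn ("\\registry\\user\\s-".toList ++ rest) ['\\'] =
      PySem.Chars.splitOn.go ['\\'] (d.length + 1) d (('s' :: '-' :: t).reverse ++ [])
        ["user".toList, "registry".toList, []] := by
    have hPL : "\\registry\\user\\s-".toList ++ rest =
        '\\' :: ("registry".toList ++ ('\\' :: ("user".toList ++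
          ('\\' :: (('s' :: '-' :: t) ++ d))))) := by
      rw [hrtd]; simp
    have hf : ("\\registry\\user\\s-".toList ++ rest).length + 1 =
        (("registry".toList : List Char).length + ((("user".toList : List Char).length +
          ((('s' :: '-' :: t).length + (d.length + 1)) + 1)) + 1)) + 1 := by
      rw [hrtd]; simp; omega
    calc PySem.Chars.splitOn ("\\registry\\user\\s-".toList ++ rest) ['\\']
        = PySem.Chars.splitOn.go ['\\']
            (("\\registry\\user\\s-".toList ++ rest).length + 1)
            ("\\registry\\user\\s-".toList ++ rest) [] [] := rfl
      _ = PySem.Chars.splitOn.go ['\\']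
            ((("registry".toList : List Char).length + ((("user".toList : List Char).length +
              ((('s' :: '-' :: t).length + (d.length + 1)) + 1)) + 1)) + 1)
            ('\\' :: ("registry".toList ++ ('\\' :: ("user".toList ++
              ('\\' :: (('s' :: '-' :: t) ++ d)))))) [] [] := by rw [hf, hPL]
      _ = PySem.Chars.splitOn.go ['\\']
            (("registry".toList : List Char).length + ((("user".toList : List Char).length +
              ((('s' :: '-' :: t).length + (d.length + 1)) + 1)) + 1))
            ("registry".toList ++ ('\\' :: ("user".toList ++
              ('\\' :: (('s' :: '-' :: t) ++ d))))) [] [[]] := by rw [go_bs]; simp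
      _ = PySem.Chars.splitOn.go ['\\']
            ((("user".toList : List Char).length +
              ((('s' :: '-' :: t).length + (d.length + 1)) + 1)) + 1)
            ('\\' :: ("user".toList ++ ('\\' :: (('s' :: '-' :: t) ++ d))))
            ("registry".toList.reverse ++ []) [[]] := by
          rw [go_run "registry".toList hregne]
      _ = PySem.Chars.splitOn.go ['\\']
            (("user".toList : List Char).length +
              ((('s' :: '-' :: t).length + (d.length + 1)) + 1))
            ("user".toList ++ ('\\' :: (('s' :: '-' :: t) ++ d)))
            [] ["registry".toList, []] := by rw [go_bs]; simp
      _ = PySem.Chars.splitOn.go ['\\']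
            ((('s' :: '-' :: t).length + (d.length + 1)) + 1)
            ('\\' :: (('s' :: '-' :: t) ++ d))
            ("user".toList.reverse ++ []) ["registry".toList, []] := by
          rw [go_run "user".toList husrne]
      _ = PySem.Chars.splitOn.go ['\\']
            (('s' :: '-' :: t).length + (d.length + 1))
            (('s' :: '-' :: t) ++ d)
            [] ["user".toList, "registry".toList, []] := by rw [go_bs]; simp
      _ = PySem.Chars.splitOn.go ['\\'] (d.length + 1) d (('s' :: '-' :: t).reverse ++ [])
            ["user".toList, "registry".toList, []] := by
          rw [go_run ('s' :: '-' :: t) htne]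
  rw [hsplit]
  cases hde : d with
  | nil =>
      rw [go_nil]
      simp [PySem.Chars.join, List.intercalate]
  | cons c r =>
      have hc : c = '\\' := by
        have hne : rest.dropWhile (fun c => c != '\\') ≠ [] := by
          rw [← hd, hde]; simp
        have := List.head_dropWhile_not (fun c => c != '\\') (l := rest) hne
        simp only [← hd, hde, List.head_cons] at this
        simpa using this
      subst hc
      obtain ⟨g0, G', hG⟩ : ∃ g0 G', PySem.Chars.splitOn.go ['\\'] (r.length + 1) r [] [] = g0 :: G' := by
        cases hE : PySem.Chars.splitOn.go ['\\'] (r.length + 1) r [] [] with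
        | nil => exact absurd hE (go_ne_nil _ r [] [])
        | cons a b => exact ⟨a, b, rfl⟩
      have hjoin : PySem.Chars.join ['\\'] (g0 :: G') = r := by
        rw [← hG]
        simpa using go_join (r.length + 1) r [] (by omega)
      have hfin : PySem.Chars.splitOn.go ['\\'] (('\\' :: r : List Char).length + 1) ('\\' :: r)
          (('s' :: '-' :: t).reverse ++ []) ["user".toList, "registry".toList, []]
          = [[], "registry".toList, "user".toList, 's' :: '-' :: t] ++ (g0 :: G') := by
        rw [show (('\\' :: r : List Char).length + 1) = (r.length + 1) + 1 by simp]
        rw [go_bs, go_acc, hG]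
        simp
      rw [hfin]
      rw [List.eraseIdx_append_of_lt_length (by simp) (g0 :: G')]
      rw [show ([[], "registry".toList, "user".toList, 's' :: '-' :: t].eraseIdx 3)
          = [[], "registry".toList, "user".toList] by rfl]
      rw [show ([[], "registry".toList, "user".toList] ++ g0 :: G')
          = [] :: "registry".toList :: "user".toList :: g0 :: G' by simp]
      rw [PySem.Chars.join_cons_cons, PySem.Chars.join_cons_cons, PySem.Chars.join_cons_cons, hjoin]
      simp

theorem drop_len_takeWhile (p : Char → Bool) : ∀ l : List Char,
    l.drop (l.takeWhile p).length = l.dropWhile p := by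
  intro l
  induction l with
  | nil => simp
  | cons c l ih =>
      by_cases hc : p c
      · rw [List.takeWhile_cons_of_pos hc, List.dropWhile_cons_of_pos hc]
        simpa using ih
      · rw [List.takeWhile_cons_of_neg (by simp [hc]), List.dropWhile_cons_of_neg (by simp [hc])]
        simp

theorem key_lemma_A (rest : List Char) :
    ("\\registry\\user\\s-".toList ++ rest).take 14 ++
        ("\\registry\\user\\s-".toList ++ rest).drop
          (remove_user_id_scan ("\\registry\\user\\s-".toList ++ rest) 15) =
      "\\registry\\user".toList ++ rest.dropWhile (fun c => c != '\\') := by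
  rw [scan_eq]
  have e1 : ("\\registry\\user\\s-".toList ++ rest) =
      "\\registry\\user".toList ++ '\\' :: 's' :: '-' :: rest := by simp
  rw [e1]
  have e2 : ("\\registry\\user".toList ++ '\\' :: 's' :: '-' :: rest).drop 15
      = 's' :: '-' :: rest := by
    rw [show (15 : Nat) = ("\\registry\\user".toList : List Char).length + 1 by simp]
    rw [List.drop_length_add_append]
    rfl
  rw [e2]
  rw [List.takeWhile_cons_of_pos (by simp), List.takeWhile_cons_of_pos (by simp)]
  rw [List.take_append_of_le_length (by simp)]
  have e3 : ∀ w : Nat, (15 + (('s' :: '-' :: (rest.takeWhile (fun c => c != '\\'))).length))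
      = ("\\registry\\user".toList : List Char).length +
        ((rest.takeWhile (fun c => c != '\\')).length + 3) := by
    intro _; simp; omega
  rw [e3 0, List.drop_length_add_append]
  have e4 : ((rest.takeWhile (fun c => c != '\\')).length + 3)
      = ((rest.takeWhile (fun c => c != '\\')).length + 2) + 1 := by omega
  rw [e4, List.drop_succ_cons,
      show ((rest.takeWhile (fun c => c != '\\')).length + 2)
        = ((rest.takeWhile (fun c => c != '\\')).length + 1) + 1 by omega,
      List.drop_succ_cons, List.drop_succ_cons]
  rw [drop_len_takeWhile]
  simp

-- ===== VERDICT (by name: the statement is the Claim_ definition above) =====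
theorem remove_user_id_spec : Claim_equal_remove_user_id := by
  intro k _
  unfold Spec_remove_user_id remove_user_id remove_user_id_alt
  set s := PySem.Str.lower k with hs
  cases hsw : PySem.Str.startswith s "\\registry\\user\\s-" with
  | false => rw [if_pos hsw, if_pos hsw]
  | true =>
    rw [PySem.Str.startswith_eq] at hsw
    rw [if_neg (by simp; simpa using hsw), if_neg (by simp; simpa using hsw)]
    apply congrArg String.ofList
    have hpre : "\\registry\\user\\s-".toList <+: s.toList :=
      (PySem.Chars.startswith_iff _ _).mp hsw
    obtain ⟨rest, hrest⟩ := hpre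
    have h1 : PySem.Chars.slice s.toList none (some 14) = s.toList.take 14 := by
      simp [pysem]
    have h2 : PySem.Chars.slice s.toList (some ((remove_user_id_scan s.toList 15 : Nat) : Int)) none
        = s.toList.drop (remove_user_id_scan s.toList 15) := by
      simp [pysem]
    rw [h1, h2, ← hrest, key_lemma_A rest, key_lemma rest]
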